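-- pv_equiv track=rewrite | github.com/calm-passion/goodjob | src/languages/go/extract_go.py | clean_source
-- ===== SOURCE A (Python) =====
-- def clean_source(source):
--     """Remove Go comments and string/rune literals, preserving newlines."""
--     out = []
--     i = 0
--     n = len(source)
--
--     while i < n:
--         # Block comment /* ... */
--         if source[i:i+2] == '/*':
--             j = source.find('*/', i + 2)
--             if j == -1:
--                 out.append('\n' * source[i:].count('\n'))
--                 break
--             out.append('\n' * source[i:j+2].count('\n'))
--             i = j + 2
--
--         # Line comment // ...
--         elif source[i:i+2] == '//':
--             j = source.find('\n', i)
--             out.append('\n')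
--             i = (j + 1) if j != -1 else n
--
--         # Raw string literal `...`
--         elif source[i] == '`':
--             i += 1
--             while i < n and source[i] != '`':
--                 out.append('\n' if source[i] == '\n' else ' ')
--                 i += 1
--             i += 1  # closing `
--
--         # Interpreted string literal "..."
--         elif source[i] == '"':
--             out.append('"')
--             i += 1
--             while i < n:
--                 if source[i] == '\\':
--                     out.append(' ')
--                     i = min(i + 2, n)
--                 elif source[i] == '"':
--                     out.append('"')
--                     i += 1
--                     break
--                 else:
--                     out.append('\n' if source[i] == '\n' else ' ')
--                     i += 1
--
--         # Rune literal '...'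
--         elif source[i] == "'":
--             i += 1
--             while i < n:
--                 if source[i] == '\\':
--                     i = min(i + 2, n)
--                 elif source[i] == "'":
--                     i += 1
--                     break
--                 else:
--                     i += 1
--
--         else:
--             out.append(source[i])
--             i += 1
--
--     return ''.join(out)
-- ===== SOURCE B (Python) =====
-- def clean_source(source):
--     """Remove Go comments and string/rune literals, preserving newlines."""
--     CODE, SLASH, BLOCK, BLOCKSTAR, LINE, RAW, STR, STRESC, RUNE, RUNEESC = range(10)
--
--     def dispatch(c):
--         # entering a new token from plain code
--         if c == '/':
--             return SLASH, ''
--         if c == '`':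
--             return RAW, ''
--         if c == '"':
--             return STR, '"'
--         if c == "'":
--             return RUNE, ''
--         return CODE, c
--
--     out = []
--     st = CODE
--     for c in source:
--         if st == CODE:
--             st, piece = dispatch(c)
--             out.append(piece)
--         elif st == SLASH:
--             if c == '*':
--                 st = BLOCK
--             elif c == '/':
--                 out.append('\n')
--                 st = LINE
--             else:
--                 st, piece = dispatch(c)
--                 out.append('/' + piece)
--         elif st == BLOCK:
--             if c == '*':
--                 st = BLOCKSTAR
--             elif c == '\n':
--                 out.append('\n')
--         elif st == BLOCKSTAR:
--             if c == '/':
--                 st = CODE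
--             elif c == '*':
--                 pass
--             elif c == '\n':
--                 out.append('\n')
--                 st = BLOCK
--             else:
--                 st = BLOCK
--         elif st == LINE:
--             if c == '\n':
--                 st = CODE
--         elif st == RAW:
--             if c == '`':
--                 st = CODE
--             else:
--                 out.append('\n' if c == '\n' else ' ')
--         elif st == STR:
--             if c == '\\':
--                 out.append(' ')
--                 st = STRESC
--             elif c == '"':
--                 out.append('"')
--                 st = CODE
--             else:
--                 out.append('\n' if c == '\n' else ' ')
--         elif st == STRESC:
--             st = STR
--         elif st == RUNE:
--             if c == '\\':
--                 st = RUNEESC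
--             elif c == "'":
--                 st = CODE
--         else:  # RUNEESC
--             st = RUNE
--     if st == SLASH:
--         out.append('/')
--     return ''.join(out)
-- ===== Notes on version B (the rewrite author's own statement) =====
-- stated objective: alternative
-- what changed: Replaced the index-jumping scanner (per-position two-char slice comparisons, str.find skips, substring newline counts, nested inner while-loops) with a single-pass explicit 10-state finite-state machine folded over the characters.
import Mathlib
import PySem

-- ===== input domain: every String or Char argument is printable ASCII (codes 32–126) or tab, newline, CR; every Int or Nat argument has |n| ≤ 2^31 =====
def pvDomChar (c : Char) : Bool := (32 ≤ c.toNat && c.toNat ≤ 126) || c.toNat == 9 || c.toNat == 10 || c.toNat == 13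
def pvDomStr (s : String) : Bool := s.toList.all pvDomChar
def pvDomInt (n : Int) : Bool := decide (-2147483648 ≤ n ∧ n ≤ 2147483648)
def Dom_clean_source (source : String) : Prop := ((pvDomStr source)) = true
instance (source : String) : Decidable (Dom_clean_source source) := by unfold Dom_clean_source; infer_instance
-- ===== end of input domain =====

-- B replaces A's index-jumping scanner (slice tests, find-skips, nested inner loops) with a
-- single-pass 10-state finite-state machine over the characters; same return value, no speed claim.

-- ===== PORT A =====
-- A's index-jumping scanner, ported on the character list; each `while` loop is the obvious
-- structural recursion with a fuel bound (fuel only guards totality: it is never exhausted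
-- on the call clean_source makes).

-- inner `while` loop of the raw-string branch: returns (appended output, new i)
def goRawA (s : List Char) (fuel : Nat) (i : Nat) : List Char × Nat :=
  match fuel with
  | 0 => ([], i)
  | fuel + 1 =>
    if h : i < s.length then
      if s[i] ≠ '`' then
        ((if s[i] = '\n' then '\n' else ' ') :: (goRawA s fuel (i + 1)).1, (goRawA s fuel (i + 1)).2)
      else ([], i + 1)
    else ([], i + 1)

-- inner `while` loop of the interpreted-string branch
def goStrA (s : List Char) (fuel : Nat) (i : Nat) : List Char × Nat :=
  match fuel with
  | 0 => ([], i)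
  | fuel + 1 =>
    if h : i < s.length then
      if s[i] = '\\' then
        (' ' :: (goStrA s fuel (min (i + 2) s.length)).1, (goStrA s fuel (min (i + 2) s.length)).2)
      else if s[i] = '"' then (['"'], i + 1)
      else
        ((if s[i] = '\n' then '\n' else ' ') :: (goStrA s fuel (i + 1)).1, (goStrA s fuel (i + 1)).2)
    else ([], i)

-- inner `while` loop of the rune-literal branch (no output)
def goRuneA (s : List Char) (fuel : Nat) (i : Nat) : Nat :=
  match fuel with
  | 0 => i
  | fuel + 1 =>
    if h : i < s.length then
      if s[i] = '\\' then goRuneA s fuel (min (i + 2) s.length)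
      else if s[i] = '\'' then i + 1
      else goRuneA s fuel (i + 1)
    else i

-- the main `while i < n` loop of A
def loopA (s : List Char) (fuel : Nat) (i : Nat) : List Char :=
  match fuel with
  | 0 => []
  | fuel + 1 =>
    if h : i < s.length then
      if hb : PySem.List.slice s (some (i : Int)) (some ((i : Int) + 2)) = ['/', '*'] then
        -- block comment
        if hj : PySem.Chars.findFrom s ['*', '/'] ((i : Int) + 2) none = -1 then
          List.replicate (PySem.Chars.count (PySem.List.slice s (some (i : Int)) none) ['\n']) '\n'
        else
          List.replicate (PySem.Chars.count (PySem.List.slice s (some (i : Int))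
              (some (PySem.Chars.findFrom s ['*', '/'] ((i : Int) + 2) none + 2))) ['\n']) '\n'
            ++ loopA s fuel (PySem.Chars.findFrom s ['*', '/'] ((i : Int) + 2) none + 2).toNat
      else if hl : PySem.List.slice s (some (i : Int)) (some ((i : Int) + 2)) = ['/', '/'] then
        -- line comment
        '\n' :: loopA s fuel (if PySem.Chars.findFrom s ['\n'] (i : Int) none ≠ -1 then
          (PySem.Chars.findFrom s ['\n'] (i : Int) none + 1).toNat else s.length)
      else if s[i] = '`' then
        (goRawA s fuel (i + 1)).1 ++ loopA s fuel (goRawA s fuel (i + 1)).2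
      else if s[i] = '"' then
        '"' :: ((goStrA s fuel (i + 1)).1 ++ loopA s fuel (goStrA s fuel (i + 1)).2)
      else if s[i] = '\'' then
        loopA s fuel (goRuneA s fuel (i + 1))
      else s[i] :: loopA s fuel (i + 1)
    else []

def clean_source (source : String) : String :=
  String.ofList (loopA source.toList (source.toList.length + 1) 0)

-- ===== PORT B =====
inductive GoSt : Type
  | code | slash | block | blockStar | line | raw | str | strEsc | rune | runeEsc
deriving DecidableEq, Repr

-- entering a new token from plain code (`dispatch` in Source B)
def dispatchB (c : Char) : GoSt × List Char :=
  if c = '/' then (.slash, [])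
  else if c = '`' then (.raw, [])
  else if c = '"' then (.str, ['"'])
  else if c = '\'' then (.rune, [])
  else (.code, [c])

-- the for-loop of Source B: state machine over the remaining characters
def runB : GoSt → List Char → List Char
  | .slash, [] => ['/']
  | _, [] => []
  | .code, c :: t =>
      let d := dispatchB c
      d.2 ++ runB d.1 t
  | .slash, c :: t =>
      if c = '*' then runB .block t
      else if c = '/' then '\n' :: runB .line t
      else
        let d := dispatchB c
        '/' :: (d.2 ++ runB d.1 t)
  | .block, c :: t =>
      if c = '*' then runB .blockStar t
      else if c = '\n' then '\n' :: runB .block t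
      else runB .block t
  | .blockStar, c :: t =>
      if c = '/' then runB .code t
      else if c = '*' then runB .blockStar t
      else if c = '\n' then '\n' :: runB .block t
      else runB .block t
  | .line, c :: t => if c = '\n' then runB .code t else runB .line t
  | .raw, c :: t =>
      if c = '`' then runB .code t
      else if c = '\n' then '\n' :: runB .raw t
      else ' ' :: runB .raw t
  | .str, c :: t =>
      if c = '\\' then ' ' :: runB .strEsc t
      else if c = '"' then '"' :: runB .code t
      else if c = '\n' then '\n' :: runB .str t
      else ' ' :: runB .str t
  | .strEsc, _ :: t => runB .str t
  | .rune, c :: t =>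
      if c = '\\' then runB .runeEsc t
      else if c = '\'' then runB .code t
      else runB .rune t
  | .runeEsc, _ :: t => runB .rune t

def clean_source_alt (source : String) : String := String.ofList (runB .code source.toList)

-- ===== PRECONDITION & SPEC =====
def Spec_clean_source (source : String) (out : String) : Prop := out = clean_source_alt source
instance (source : String) (out : String) : Decidable (Spec_clean_source source out) := by unfold Spec_clean_source; infer_instance

-- ===== CLAIM (what is proved, stated in full; the proofs are below) =====
def Claim_equal_clean_source : Prop := ∀ (source : String), Dom_clean_source source → Spec_clean_source source (clean_source source)


-- ===== LEMMAS AND PROOFS =====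
set_option maxRecDepth 4096 in
theorem count_go_singleton (c : Char) : ∀ (fuel : Nat) (l : List Char) (acc : Nat),
    l.length ≤ fuel → PySem.Chars.count.go [c] fuel l acc = acc + l.count c := by
  intro fuel
  induction fuel with
  | zero =>
    intro l acc h
    cases l with
    | nil => simp [PySem.Chars.count.go]
    | cons x t => simp at h
  | succ n ih =>
    intro l acc h
    cases l with
    | nil => simp [PySem.Chars.count.go]
    | cons x t =>
      rw [PySem.Chars.count.go]
      by_cases hx : c = x
      · have hp : [c].isPrefixOf (x :: t) = true := by simp [List.isPrefixOf, hx]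
        simp only [hp, if_true, List.length_singleton, List.drop_one, List.tail_cons]
        rw [ih t (acc + 1) (by simpa using h)]
        simp [hx]
        omega
      · have hp : [c].isPrefixOf (x :: t) = false := by
          simpa [List.isPrefixOf] using hx
        simp only [hp, if_false, Bool.false_eq_true]
        rw [ih t acc (by simpa using h)]
        have hxx : ¬ x = c := fun hh => hx hh.symm
        simp [hxx]

theorem count_singleton (l : List Char) (c : Char) :
    PySem.Chars.count l [c] = l.count c := by
  simp only [PySem.Chars.count, List.isEmpty_cons, if_false, Bool.false_eq_true]
  simpa using count_go_singleton c l.length l 0 le_rfl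

theorem replicate_count_eq_filter (l : List Char) :
    List.replicate (l.count '\n') '\n' = l.filter (· == '\n') := by
  exact (List.filter_beq '\n').symm


theorem runB_slash_not_comment (t : List Char)
    (h : ∀ c, t.head? = some c → c ≠ '*' ∧ c ≠ '/') :
    runB .slash t = '/' :: runB .code t := by
  cases t with
  | nil => simp [runB]
  | cons c u =>
    have hc := h c rfl
    simp [runB, dispatchB, hc.1, hc.2]


theorem goRawA_ge (s : List Char) : ∀ (fuel i : Nat), s.length - i < fuel →
    i + 1 ≤ (goRawA s fuel i).2 := by
  intro fuel
  induction fuel with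
  | zero => intro i h; exact absurd h (Nat.not_lt_zero _)
  | succ f ih =>
    intro i h
    rw [goRawA]
    by_cases hi : i < s.length
    · rw [dif_pos hi]
      by_cases hne : s[i] ≠ '`'
      · rw [if_pos hne]
        have := ih (i + 1) (by omega)
        omega
      · rw [if_neg hne]
    · rw [dif_neg hi]

theorem goStrA_ge (s : List Char) : ∀ (fuel i : Nat), s.length - i < fuel →
    i ≤ (goStrA s fuel i).2 := by
  intro fuel
  induction fuel with
  | zero => intro i h; exact absurd h (Nat.not_lt_zero _)
  | succ f ih =>
    intro i h
    rw [goStrA]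
    by_cases hi : i < s.length
    · rw [dif_pos hi]
      by_cases hesc : s[i] = '\\'
      · rw [if_pos hesc]
        have := ih (min (i + 2) s.length) (by omega)
        simp only
        omega
      · rw [if_neg hesc]
        by_cases hq : s[i] = '"'
        · rw [if_pos hq]
          simp
        · rw [if_neg hq]
          have := ih (i + 1) (by omega)
          simp only
          omega
    · rw [dif_neg hi]

theorem goRuneA_ge (s : List Char) : ∀ (fuel i : Nat), s.length - i < fuel →
    i ≤ goRuneA s fuel i := by
  intro fuel
  induction fuel with
  | zero => intro i h; exact absurd h (Nat.not_lt_zero _)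
  | succ f ih =>
    intro i h
    rw [goRuneA]
    by_cases hi : i < s.length
    · rw [dif_pos hi]
      by_cases hesc : s[i] = '\\'
      · rw [if_pos hesc]
        have := ih (min (i + 2) s.length) (by omega)
        omega
      · rw [if_neg hesc]
        by_cases hq : s[i] = '\''
        · rw [if_pos hq]; omega
        · rw [if_neg hq]
          have := ih (i + 1) (by omega)
          omega
    · rw [dif_neg hi]

-- the raw-string inner loop agrees with the raw state of the machine
theorem runB_raw_eq (s : List Char) : ∀ (fuel i : Nat), s.length - i < fuel →
    runB .raw (s.drop i) = (goRawA s fuel i).1 ++ runB .code (s.drop (goRawA s fuel i).2) := by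
  intro fuel
  induction fuel with
  | zero => intro i h; exact absurd h (Nat.not_lt_zero _)
  | succ f ih =>
    intro i h
    rw [goRawA]
    by_cases hi : i < s.length
    · rw [dif_pos hi]
      by_cases hne : s[i] ≠ '`'
      · rw [if_pos hne, List.drop_eq_getElem_cons hi]
        simp only [runB, if_neg hne]
        rw [ih (i + 1) (by omega)]
        by_cases hnl : s[i] = '\n' <;> simp [hnl]
      · rw [if_neg hne]
        have he : s[i] = '`' := not_not.mp hne
        rw [List.drop_eq_getElem_cons hi, he]
        simp [runB]
    · rw [dif_neg hi]
      have h1 : s.drop i = [] := List.drop_eq_nil_of_le (by omega)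
      have h2 : s.drop (i + 1) = [] := List.drop_eq_nil_of_le (by omega)
      simp [h1, h2, runB]

theorem runB_strEsc_min (s : List Char) (i : Nat) :
    runB .strEsc (s.drop (i + 1)) = runB .str (s.drop (min (i + 2) s.length)) := by
  by_cases h : i + 1 < s.length
  · rw [List.drop_eq_getElem_cons h]
    have : min (i + 2) s.length = i + 2 := by omega
    simp [runB, this]
  · have h1 : s.drop (i + 1) = [] := List.drop_eq_nil_of_le (by omega)
    have h2 : s.drop (min (i + 2) s.length) = [] := List.drop_eq_nil_of_le (by omega)
    simp [h1, h2, runB]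

-- the interpreted-string inner loop agrees with the str state of the machine
theorem runB_str_eq (s : List Char) : ∀ (fuel i : Nat), s.length - i < fuel →
    runB .str (s.drop i) = (goStrA s fuel i).1 ++ runB .code (s.drop (goStrA s fuel i).2) := by
  intro fuel
  induction fuel with
  | zero => intro i h; exact absurd h (Nat.not_lt_zero _)
  | succ f ih =>
    intro i h
    rw [goStrA]
    by_cases hi : i < s.length
    · rw [dif_pos hi]
      by_cases hesc : s[i] = '\\'
      · rw [if_pos hesc, List.drop_eq_getElem_cons hi, hesc]
        simp only [runB]
        rw [runB_strEsc_min, ih (min (i + 2) s.length) (by omega)]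
        simp
      · rw [if_neg hesc]
        by_cases hq : s[i] = '"'
        · rw [if_pos hq, List.drop_eq_getElem_cons hi, hq]
          simp [runB]
        · rw [if_neg hq, List.drop_eq_getElem_cons hi]
          simp only [runB, hesc, hq]
          rw [ih (i + 1) (by omega)]
          by_cases hnl : s[i] = '\n' <;> simp [hnl]
    · rw [dif_neg hi]
      have h1 : s.drop i = [] := List.drop_eq_nil_of_le (by omega)
      simp [h1, runB]

theorem runB_runeEsc_min (s : List Char) (i : Nat) :
    runB .runeEsc (s.drop (i + 1)) = runB .rune (s.drop (min (i + 2) s.length)) := by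
  by_cases h : i + 1 < s.length
  · rw [List.drop_eq_getElem_cons h]
    have : min (i + 2) s.length = i + 2 := by omega
    simp [runB, this]
  · have h1 : s.drop (i + 1) = [] := List.drop_eq_nil_of_le (by omega)
    have h2 : s.drop (min (i + 2) s.length) = [] := List.drop_eq_nil_of_le (by omega)
    simp [h1, h2, runB]

-- the rune-literal inner loop agrees with the rune state of the machine
theorem runB_rune_eq (s : List Char) : ∀ (fuel i : Nat), s.length - i < fuel →
    runB .rune (s.drop i) = runB .code (s.drop (goRuneA s fuel i)) := by
  intro fuel
  induction fuel with
  | zero => intro i h; exact absurd h (Nat.not_lt_zero _)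
  | succ f ih =>
    intro i h
    rw [goRuneA]
    by_cases hi : i < s.length
    · rw [dif_pos hi]
      by_cases hesc : s[i] = '\\'
      · rw [if_pos hesc, List.drop_eq_getElem_cons hi, hesc]
        simp only [runB]
        rw [runB_runeEsc_min, ih (min (i + 2) s.length) (by omega)]
        simp
      · rw [if_neg hesc]
        by_cases hq : s[i] = '\''
        · rw [if_pos hq, List.drop_eq_getElem_cons hi, hq]
          simp [runB]
        · rw [if_neg hq, List.drop_eq_getElem_cons hi]
          simp only [runB, hesc, hq]
          exact ih (i + 1) (by omega)
    · rw [dif_neg hi]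
      have h1 : s.drop i = [] := List.drop_eq_nil_of_le (by omega)
      simp [h1, runB]

theorem runB_line_none (l : List Char) (h : '\n' ∉ l) : runB .line l = [] := by
  induction l with
  | nil => simp [runB]
  | cons c t ih =>
    have hc : c ≠ '\n' := fun hh => h (hh ▸ List.mem_cons_self)
    simp only [runB, if_neg hc]
    exact ih (fun hm => h (List.mem_cons_of_mem _ hm))

theorem runB_line_found (l : List Char) (m : Nat) (hm : l[m]? = some '\n')
    (hmin : ∀ p < m, l[p]? ≠ some '\n') :
    runB .line l = runB .code (l.drop (m + 1)) := by
  induction l generalizing m with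
  | nil => simp at hm
  | cons c t ih =>
    cases m with
    | zero =>
      simp only [List.getElem?_cons_zero, Option.some.injEq] at hm
      simp [runB, hm]
    | succ m' =>
      have hc : c ≠ '\n' := by
        have := hmin 0 (Nat.succ_pos m')
        simpa using this
      simp only [runB, if_neg hc]
      rw [ih m' (by simpa using hm) (fun p hp => by simpa using hmin (p + 1) (by omega))]
      simp

theorem runB_block_none : ∀ (k : Nat) (l : List Char), l.length ≤ k →
    (¬ ['*', '/'] <:+: l → runB .block l = l.filter (· == '\n')) ∧
    (¬ ['*', '/'] <:+: ('*' :: l) → runB .blockStar l = l.filter (· == '\n')) := by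
  intro k
  induction k with
  | zero =>
    intro l hl
    have hnil : l = [] := by cases l <;> simp_all
    subst hnil
    exact ⟨fun _ => by simp [runB], fun _ => by simp [runB]⟩
  | succ n ih =>
    intro l hl
    constructor
    · intro hinf
      cases l with
      | nil => simp [runB]
      | cons c t =>
        by_cases hc : c = '*'
        · subst hc
          have h1 : runB .block ('*' :: t) = runB .blockStar t := by simp [runB]
          rw [h1, (ih t (by simpa using hl)).2 hinf]
          simp
        · have ht : ¬ ['*', '/'] <:+: t := fun hi => hinf (List.infix_cons hi)
          simp only [runB, if_neg hc]
          rw [(ih t (by simpa using hl)).1 ht]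
          by_cases hn : c = '\n' <;> simp [hn]
    · intro hinf
      cases l with
      | nil => simp [runB]
      | cons c u =>
        by_cases hc : c = '/'
        · exfalso
          apply hinf
          subst hc
          exact (List.cons_prefix_cons.mpr ⟨rfl, List.cons_prefix_cons.mpr ⟨rfl, List.nil_prefix⟩⟩).isInfix
        · by_cases hs : c = '*'
          · subst hs
            have hu : ¬ ['*', '/'] <:+: ('*' :: u) := fun hi =>
              hinf (hi.trans (List.suffix_cons '*' ('*' :: u)).isInfix)
            have h1 : runB .blockStar ('*' :: u) = runB .blockStar u := by simp [runB]
            rw [h1, (ih u (by simpa using hl)).2 hu]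
            simp
          · have hu : ¬ ['*', '/'] <:+: u := fun hi => hinf (List.infix_cons (List.infix_cons hi))
            simp only [runB, if_neg hc, if_neg hs]
            rw [(ih u (by simpa using hl)).1 hu]
            by_cases hn : c = '\n' <;> simp [hn]

theorem runB_block_found : ∀ (k : Nat) (l : List Char) (m : Nat), l.length ≤ k →
    ((['*', '/'] <+: l.drop m) → (∀ p < m, ¬ ['*', '/'] <+: l.drop p) →
      runB .block l = (l.take (m + 2)).filter (· == '\n') ++ runB .code (l.drop (m + 2))) ∧
    ((['*', '/'] <+: ('*' :: l).drop m) → (∀ p < m, ¬ ['*', '/'] <+: ('*' :: l).drop p) →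
      runB .blockStar l =
        (('*' :: l).take (m + 2)).filter (· == '\n') ++ runB .code (('*' :: l).drop (m + 2))) := by
  intro k
  induction k with
  | zero =>
    intro l m hl
    have hnil : l = [] := by cases l <;> simp_all
    subst hnil
    constructor
    · intro hpre _
      exfalso
      have := hpre.length_le
      simp at this
    · intro hpre _
      exfalso
      have := hpre.length_le
      simp [List.length_drop] at this
      omega
  | succ n ih =>
    intro l m hl
    constructor
    · -- block state
      intro hpre hmin
      cases l with
      | nil =>
        exfalso
        have := hpre.length_le
        simp at this
      | cons c t =>
        by_cases hc : c = '*'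
        · subst hc
          have h1 : runB .block ('*' :: t) = runB .blockStar t := by simp [runB]
          rw [h1, (ih t m (by simpa using hl)).2 hpre hmin]
        · have hm0 : m ≠ 0 := by
            intro hm
            subst hm
            simp only [List.drop_zero] at hpre
            exact hc (List.cons_prefix_cons.mp hpre).1.symm
          obtain ⟨m', rfl⟩ : ∃ m', m = m' + 1 := ⟨m - 1, by omega⟩
          have hih := (ih t m' (by simpa using hl)).1
            (by simpa using hpre)
            (fun p hp => by simpa using hmin (p + 1) (by omega))
          simp only [runB, if_neg hc]
          rw [hih]
          by_cases hn : c = '\n' <;> simp [hn]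
    · -- blockStar state
      intro hpre hmin
      cases l with
      | nil =>
        exfalso
        have := hpre.length_le
        simp [List.length_drop] at this
        omega
      | cons c u =>
        by_cases hc : c = '/'
        · subst hc
          have hm0 : m = 0 := by
            by_contra hm
            exact hmin 0 (by omega)
              (by simp only [List.drop_zero]
                  exact List.cons_prefix_cons.mpr ⟨rfl, List.cons_prefix_cons.mpr ⟨rfl, List.nil_prefix⟩⟩)
          subst hm0
          simp [runB]
        · by_cases hs : c = '*'
          · subst hs
            have hm0 : m ≠ 0 := by
              intro hm
              subst hm
              simp only [List.drop_zero] at hpre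
              have := (List.cons_prefix_cons.mp hpre).2
              exact hc ((List.cons_prefix_cons.mp this).1).symm
            obtain ⟨m', rfl⟩ : ∃ m', m = m' + 1 := ⟨m - 1, by omega⟩
            have hih := (ih u m' (by simpa using hl)).2
              (by simpa using hpre)
              (fun p hp => by simpa using hmin (p + 1) (by omega))
            have h1 : runB .blockStar ('*' :: u) = runB .blockStar u := by simp [runB]
            rw [h1, hih]
            simp
          · have hm0 : m ≠ 0 := by
              intro hm
              subst hm
              simp only [List.drop_zero] at hpre
              have := (List.cons_prefix_cons.mp hpre).2
              exact hc ((List.cons_prefix_cons.mp this).1).symm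
            have hm1 : m ≠ 1 := by
              intro hm
              subst hm
              simp only [List.drop_succ_cons, List.drop_zero] at hpre
              exact hs (List.cons_prefix_cons.mp hpre).1.symm
            obtain ⟨m'', rfl⟩ : ∃ m'', m = m'' + 2 := ⟨m - 2, by omega⟩
            have hih := (ih u m'' (by simpa using hl)).1
              (by simpa using hpre)
              (fun p hp => by simpa using hmin (p + 2) (by omega))
            simp only [runB, if_neg hc, if_neg hs]
            rw [hih]
            by_cases hn : c = '\n' <;> simp [hn]

theorem singleton_prefix_iff (a : Char) (l : List Char) : [a] <+: l ↔ l.head? = some a := by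
  cases l with
  | nil => simp
  | cons c t => simp [List.cons_prefix_cons, eq_comm]

theorem loopA_end (s : List Char) (fuel : Nat) (i : Nat) (hi : s.length ≤ i) :
    loopA s fuel i = [] := by
  cases fuel with
  | zero => rfl
  | succ f => rw [loopA, dif_neg (by omega)]

theorem main_loop_aux (s : List Char) : ∀ (fuel i : Nat), s.length - i < fuel →
    loopA s fuel i = runB .code (s.drop i) := by
  intro fuel
  induction fuel with
  | zero =>
    intro i hk
    exact absurd hk (Nat.not_lt_zero _)
  | succ n ih =>
    intro i hk
    by_cases h : i < s.length
    · rw [loopA, dif_pos h]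
      by_cases hb : PySem.List.slice s (some (i : Int)) (some ((i : Int) + 2)) = ['/', '*']
      · -- block comment
        have hcast : ((i : Int) + 2) = (((i + 2 : Nat)) : Int) := by push_cast; ring
        rw [hcast] at hb ⊢
        have hlen : i + 2 ≤ s.length := by
          have h2 := congrArg List.length hb
          rw [PySem.List.length_slice, PySem.List.clampIdx_natCast, PySem.List.clampIdx_natCast] at h2
          simp at h2
          omega
        rw [dif_pos hb]
        rw [PySem.List.slice_natCast] at hb
        have htake : (s.drop i).take 2 = ['/', '*'] := by
          rw [show i + 2 - i = 2 from by omega] at hb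
          exact hb
        have hdrop : s.drop i = '/' :: '*' :: s.drop (i + 2) := by
          conv_lhs => rw [← List.take_append_drop 2 (s.drop i)]
          rw [htake, List.drop_drop, show i + 2 = 2 + i from by omega]
          rfl
        have hcode : runB .code (s.drop i) = runB .block (s.drop (i + 2)) := by
          rw [hdrop]; simp [runB, dispatchB]
        by_cases hj : PySem.Chars.findFrom s ['*', '/'] (((i + 2 : Nat)) : Int) none = -1
        · rw [dif_pos hj, hcode]
          have hinf : ¬ ['*', '/'] <:+: s.drop (i + 2) :=
            (PySem.Chars.findFrom_natCast_eq_neg_one_iff s ['*', '/'] (i + 2) hlen).mp hj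
          rw [(runB_block_none (s.drop (i + 2)).length (s.drop (i + 2)) le_rfl).1 hinf]
          rw [PySem.List.slice_from_natCast, count_singleton, replicate_count_eq_filter, hdrop]
          simp
        · rw [dif_neg hj, hcode]
          obtain ⟨hge, hpre, hmin⟩ := PySem.Chars.findFrom_natCast_spec s ['*', '/'] (i + 2) hlen hj
          obtain ⟨J, hJ⟩ : ∃ J : Nat,
              PySem.Chars.findFrom s ['*', '/'] (((i + 2 : Nat)) : Int) none = (J : Int) :=
            ⟨(PySem.Chars.findFrom s ['*', '/'] (((i + 2 : Nat)) : Int) none).toNat, by omega⟩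
          rw [hJ] at hge hpre hmin ⊢
          rw [Int.toNat_natCast] at hpre hmin
          have hJge : i + 2 ≤ J := by exact_mod_cast hge
          obtain ⟨m, rfl⟩ : ∃ m, J = i + 2 + m := ⟨J - (i + 2), by omega⟩
          have hF2 : ((i + 2 + m : Nat) : Int) + 2 = ((i + 2 + m + 2 : Nat) : Int) := by push_cast; ring
          rw [hF2, PySem.List.slice_natCast, count_singleton, replicate_count_eq_filter]
          have htk : (s.drop i).take (i + 2 + m + 2 - i) = '/' :: '*' :: (s.drop (i + 2)).take (m + 2) := by
            rw [hdrop, show i + 2 + m + 2 - i = m + 4 from by omega]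
            rfl
          rw [htk]
          have hblock := (runB_block_found (s.drop (i + 2)).length (s.drop (i + 2)) m le_rfl).1
            (by rw [List.drop_drop]; exact hpre)
            (fun p hp => by
              rw [List.drop_drop]
              exact hmin (i + 2 + p) (by omega) (by omega))
          rw [hblock, List.drop_drop, show i + 2 + (m + 2) = i + 2 + m + 2 from by omega]
          rw [Int.toNat_natCast, ih (i + 2 + m + 2) (by omega)]
          simp
      · rw [dif_neg hb]
        by_cases hl : PySem.List.slice s (some (i : Int)) (some ((i : Int) + 2)) = ['/', '/']
        · -- line comment
          have hcast : ((i : Int) + 2) = (((i + 2 : Nat)) : Int) := by push_cast; ring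
          rw [hcast] at hl ⊢
          have hlen : i + 2 ≤ s.length := by
            have h2 := congrArg List.length hl
            rw [PySem.List.length_slice, PySem.List.clampIdx_natCast, PySem.List.clampIdx_natCast] at h2
            simp at h2
            omega
          rw [dif_pos hl]
          rw [PySem.List.slice_natCast] at hl
          have htake : (s.drop i).take 2 = ['/', '/'] := by
            rw [show i + 2 - i = 2 from by omega] at hl
            exact hl
          have hdrop : s.drop i = '/' :: '/' :: s.drop (i + 2) := by
            conv_lhs => rw [← List.take_append_drop 2 (s.drop i)]
            rw [htake, List.drop_drop, show i + 2 = 2 + i from by omega]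
            rfl
          have hcode : runB .code (s.drop i) = '\n' :: runB .line (s.drop (i + 2)) := by
            rw [hdrop]; simp [runB, dispatchB]
          rw [hcode]
          congr 1
          by_cases hf : PySem.Chars.findFrom s ['\n'] (i : Int) none = -1
          · rw [if_neg (by simp [hf])]
            have hinf : ¬ ['\n'] <:+: s.drop i :=
              (PySem.Chars.findFrom_natCast_eq_neg_one_iff s ['\n'] i (by omega)).mp hf
            have hmem : '\n' ∉ s.drop (i + 2) := by
              intro hm
              have hdd : (s.drop i).drop 2 = s.drop (i + 2) := by rw [List.drop_drop]
              exact hinf (((List.singleton_infix_iff '\n' (s.drop (i + 2))).mpr hm).trans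
                (hdd ▸ (List.drop_suffix 2 (s.drop i)).isInfix))
            rw [runB_line_none (s.drop (i + 2)) hmem, loopA_end s n s.length le_rfl]
          · obtain ⟨hge, hpre, hmin⟩ := PySem.Chars.findFrom_natCast_spec s ['\n'] i (by omega) hf
            obtain ⟨J, hJ⟩ : ∃ J : Nat, PySem.Chars.findFrom s ['\n'] (i : Int) none = (J : Int) :=
              ⟨(PySem.Chars.findFrom s ['\n'] (i : Int) none).toNat, by omega⟩
            rw [hJ] at hge hpre hmin ⊢
            rw [Int.toNat_natCast] at hpre hmin
            have hJge : i ≤ J := by exact_mod_cast hge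
            have hnlJ : s[J]? = some '\n' := by
              rw [← List.head?_drop]
              exact ((singleton_prefix_iff '\n' (s.drop J)).mp hpre)
            have hs0 : s[i]? = some '/' := by
              rw [← List.head?_drop, hdrop]; rfl
            have hs1 : s[i + 1]? = some '/' := by
              have h2 : (s.drop i)[1]? = s[i + 1]? := by rw [List.getElem?_drop]
              rw [← h2, hdrop]
              rfl
            have hJ2 : i + 2 ≤ J := by
              by_contra hn
              have : J = i ∨ J = i + 1 := by omega
              rcases this with rfl | rfl
              · rw [hs0] at hnlJ; simp at hnlJ
              · rw [hs1] at hnlJ; simp at hnlJ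
            obtain ⟨m, rfl⟩ : ∃ m, J = i + 2 + m := ⟨J - (i + 2), by omega⟩
            have hline := runB_line_found (s.drop (i + 2)) m
              (by rw [List.getElem?_drop]; exact hnlJ)
              (fun p hp => by
                rw [List.getElem?_drop]
                intro hcp
                exact hmin (i + 2 + p) (by omega) (by omega)
                  ((singleton_prefix_iff '\n' _).mpr (by rw [List.head?_drop]; exact hcp)))
            rw [if_pos (by omega), show ((i + 2 + m : Nat) : Int) + 1 = ((i + 2 + m + 1 : Nat) : Int) from by push_cast; ring,
              Int.toNat_natCast, ih (i + 2 + m + 1) (by omega), hline, List.drop_drop,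
              show i + 2 + (m + 1) = i + 2 + m + 1 from by omega]
        · -- no comment here: raw string / string / rune / plain character
          rw [dif_neg hl, List.drop_eq_getElem_cons h]
          have hcast : ((i : Int) + 2) = (((i + 2 : Nat)) : Int) := by push_cast; ring
          have hsl : PySem.List.slice s (some (i : Int)) (some ((i : Int) + 2)) = (s.drop i).take 2 := by
            rw [hcast, PySem.List.slice_natCast, show i + 2 - i = 2 from by omega]
          by_cases he : s[i] = '`'
          · rw [if_pos he, he, ih (goRawA s n (i + 1)).2
                (by have := goRawA_ge s n (i + 1) (by omega); omega),
              ← runB_raw_eq s n (i + 1) (by omega)]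
            simp [runB, dispatchB]
          · rw [if_neg he]
            by_cases hq : s[i] = '"'
            · rw [if_pos hq, hq, ih (goStrA s n (i + 1)).2
                  (by have := goStrA_ge s n (i + 1) (by omega); omega),
                ← runB_str_eq s n (i + 1) (by omega)]
              simp [runB, dispatchB]
            · rw [if_neg hq]
              by_cases hr : s[i] = '\''
              · rw [if_pos hr, hr, ih (goRuneA s n (i + 1))
                    (by have := goRuneA_ge s n (i + 1) (by omega); omega),
                  ← runB_rune_eq s n (i + 1) (by omega)]
                simp [runB, dispatchB]
              · rw [if_neg hr, ih (i + 1) (by omega)]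
                by_cases hs0 : s[i] = '/'
                · rw [hs0]
                  have hhead : ∀ c, (s.drop (i + 1)).head? = some c → c ≠ '*' ∧ c ≠ '/' := by
                    intro c hc
                    have h1 : i + 1 < s.length := by
                      by_contra hn
                      rw [List.drop_eq_nil_of_le (by omega)] at hc
                      simp at hc
                    have hc1 : s[i + 1] = c := by
                      have hcc : s[i + 1]? = some c := by simpa using hc
                      rw [List.getElem?_eq_getElem h1] at hcc
                      exact Option.some.inj hcc
                    have htk2 : (s.drop i).take 2 = ['/', c] := by
                      rw [List.drop_eq_getElem_cons h, List.drop_eq_getElem_cons h1]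
                      simp [hs0, hc1]
                    constructor <;> rintro rfl
                    · exact hb (by rw [hsl, htk2])
                    · exact hl (by rw [hsl, htk2])
                  have hslash : runB .code ('/' :: s.drop (i + 1)) = '/' :: runB .code (s.drop (i + 1)) := by
                    rw [show runB .code ('/' :: s.drop (i + 1)) = runB .slash (s.drop (i + 1)) from by
                      simp [runB, dispatchB]]
                    exact runB_slash_not_comment _ hhead
                  rw [hslash]
                · have : runB .code (s[i] :: s.drop (i + 1)) = s[i] :: runB .code (s.drop (i + 1)) := by
                    simp [runB, dispatchB, hs0, he, hq, hr]
                  rw [this]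
    · rw [loopA, dif_neg h]
      rw [List.drop_eq_nil_of_le (by omega)]
      rfl


-- ===== VERDICT (by name: the statement is the Claim_ definition above) =====
theorem clean_source_spec : Claim_equal_clean_source := by
  intro source _
  unfold Spec_clean_source clean_source clean_source_alt
  rw [main_loop_aux source.toList (source.toList.length + 1) 0 (by omega), List.drop_zero]
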